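-- pv_equiv track=rewrite | github.com/Sefaria/Sefaria-Data | linking_utilities/citation_disambiguator/modify_tanakh_links.py | convert_normalized_indices_to_unnormalized_indices
-- ===== SOURCE A (Python) =====
-- def convert_normalized_indices_to_unnormalized_indices(normalized_indices, removal_map):
--     from bisect import bisect_right, bisect_left
--     removal_keys = sorted(removal_map.keys())
--     unnormalized_indices = []
--     for start, end in normalized_indices:
--         unnorm_start_index = bisect_left(removal_keys, start) - 1
--         unnorm_end_index = bisect_left(removal_keys, end - 1) - 1
--         unnorm_start = start if unnorm_start_index < 0 else start + removal_map[removal_keys[unnorm_start_index]]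
--         unnorm_end = end if unnorm_end_index < 0 else end + removal_map[removal_keys[unnorm_end_index]]
--         unnormalized_indices += [(unnorm_start, unnorm_end)]
--     return unnormalized_indices
-- ===== SOURCE B (Python) =====
-- def convert_normalized_indices_to_unnormalized_indices(normalized_indices, removal_map):
--     def shift(coord, bound):
--         candidates = [k for k in removal_map if k < bound]
--         if not candidates:
--             return coord
--         return coord + removal_map[max(candidates)]
--     return [(shift(start, start), shift(end, end - 1)) for start, end in normalized_indices]
-- ===== Notes on version B (the rewrite author's own statement) =====
-- stated objective: simpler
-- what changed: Replaces the sort-once-then-bisect lookup with a direct per-coordinate linear scan: the applicable offset key is max of the removal-map keys strictly below the coordinate (start, resp. end-1), found by a filter + max with no sorting and no binary search.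
import Mathlib
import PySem

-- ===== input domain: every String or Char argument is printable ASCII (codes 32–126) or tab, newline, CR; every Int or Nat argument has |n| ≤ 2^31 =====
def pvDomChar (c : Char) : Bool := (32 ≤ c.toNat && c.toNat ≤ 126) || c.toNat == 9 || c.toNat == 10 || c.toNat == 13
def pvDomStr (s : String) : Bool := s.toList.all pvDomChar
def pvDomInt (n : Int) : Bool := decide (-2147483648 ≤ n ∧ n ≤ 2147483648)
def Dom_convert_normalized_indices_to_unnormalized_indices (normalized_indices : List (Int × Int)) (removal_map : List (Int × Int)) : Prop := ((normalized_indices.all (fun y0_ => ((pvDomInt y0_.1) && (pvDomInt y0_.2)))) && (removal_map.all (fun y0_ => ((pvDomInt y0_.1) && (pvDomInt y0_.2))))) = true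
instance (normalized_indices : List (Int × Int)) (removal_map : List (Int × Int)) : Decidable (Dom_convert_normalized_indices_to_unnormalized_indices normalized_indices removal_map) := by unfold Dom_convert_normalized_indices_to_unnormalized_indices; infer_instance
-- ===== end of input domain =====

-- B replaces the sort-then-bisect offset lookup with a per-coordinate linear scan
-- (max of the keys strictly below the coordinate); objective: simpler, not faster.

-- ===== PORT A =====
-- removal_map[key] is ported as Dict.getD … 0: the key is always taken from the
-- dict's own key list, so the Python access never raises and the default is unreachable.
def convert_normalized_indices_to_unnormalized_indices (normalized_indices : List (Int × Int)) (removal_map : List (Int × Int)) : List (Int × Int) :=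
  let d := PySem.Dict.ofList removal_map
  let removal_keys := PySem.List.sorted (PySem.Dict.keys d) (fun k => k) false
  normalized_indices.foldl (fun acc p =>
    let start := p.1
    let end_ := p.2
    let unnorm_start_index : Int := (PySem.List.bisectLeft removal_keys start : Int) - 1
    let unnorm_end_index : Int := (PySem.List.bisectLeft removal_keys (end_ - 1) : Int) - 1
    let unnorm_start := if unnorm_start_index < 0 then start
      else start + PySem.Dict.getD d (PySem.List.pyGetD removal_keys unnorm_start_index 0) 0
    let unnorm_end := if unnorm_end_index < 0 then end_
      else end_ + PySem.Dict.getD d (PySem.List.pyGetD removal_keys unnorm_end_index 0) 0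
    acc ++ [(unnorm_start, unnorm_end)]) []

-- ===== PORT B =====
-- 'removal_map[max(candidates)]' likewise never raises (the max is one of the keys).
def pvShift (d : PySem.Dict Int Int) (coord bound : Int) : Int :=
  match PySem.List.max? ((PySem.Dict.keys d).filter (fun k => decide (k < bound))) (fun k => k) with
  | none => coord
  | some m => coord + PySem.Dict.getD d m 0

def convert_normalized_indices_to_unnormalized_indices_alt (normalized_indices : List (Int × Int)) (removal_map : List (Int × Int)) : List (Int × Int) :=
  let d := PySem.Dict.ofList removal_map
  normalized_indices.map (fun p => (pvShift d p.1 p.1, pvShift d p.2 (p.2 - 1)))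

-- ===== PRECONDITION & SPEC =====
def Spec_convert_normalized_indices_to_unnormalized_indices (normalized_indices : List (Int × Int)) (removal_map : List (Int × Int)) (out : List (Int × Int)) : Prop := out = convert_normalized_indices_to_unnormalized_indices_alt normalized_indices removal_map
instance (normalized_indices : List (Int × Int)) (removal_map : List (Int × Int)) (out : List (Int × Int)) : Decidable (Spec_convert_normalized_indices_to_unnormalized_indices normalized_indices removal_map out) := by unfold Spec_convert_normalized_indices_to_unnormalized_indices; infer_instance

-- ===== CLAIM (what is proved, stated in full; the proofs are below) =====
def Claim_equal_convert_normalized_indices_to_unnormalized_indices : Prop := ∀ (normalized_indices : List (Int × Int)) (removal_map : List (Int × Int)), Dom_convert_normalized_indices_to_unnormalized_indices normalized_indices removal_map → Spec_convert_normalized_indices_to_unnormalized_indices normalized_indices removal_map (convert_normalized_indices_to_unnormalized_indices normalized_indices removal_map)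

-- ===== LEMMAS AND PROOFS =====

-- Core: on any bound x, A's "sorted keys + bisect_left - 1" lookup equals
-- B's "max key strictly below x" linear scan.
theorem pvShift_eq (d : PySem.Dict Int Int) (x0 x : Int) :
    (if ((PySem.List.bisectLeft (PySem.List.sorted (PySem.Dict.keys d) (fun k => k) false) x : Int) - 1) < 0 then x0
     else x0 + PySem.Dict.getD d (PySem.List.pyGetD (PySem.List.sorted (PySem.Dict.keys d) (fun k => k) false)
       ((PySem.List.bisectLeft (PySem.List.sorted (PySem.Dict.keys d) (fun k => k) false) x : Int) - 1) 0) 0)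
    = pvShift d x0 x := by
  set ks := PySem.Dict.keys d with hks
  set s := PySem.List.sorted ks (fun k => k) false with hs
  have hpw : s.Pairwise (fun a b => a ≤ b) := PySem.List.sorted_pairwise ks (fun k => k)
  obtain ⟨hle, hlt, hge⟩ := PySem.List.bisectLeft_spec s x hpw
  set c := PySem.List.bisectLeft s x with hc
  rcases Nat.eq_zero_or_pos c with h0 | hpos
  · -- no key below x: B's filter is empty
    have hfilt : ks.filter (fun k => decide (k < x)) = [] := by
      rw [List.filter_eq_nil_iff]
      intro k hk
      have hk' : k ∈ s := (PySem.List.mem_sorted ks (fun k => k) false k).2 hk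
      obtain ⟨j, hj, rfl⟩ := List.mem_iff_getElem.1 hk'
      have := hge j hj (by omega)
      simp only [decide_eq_true_eq]
      omega
    rw [if_pos (by omega)]
    unfold pvShift
    rw [← hks, hfilt]
    rfl
  · -- c ≥ 1: A takes s[c-1]; B's max is the same key
    have hm1 : c - 1 < s.length := by omega
    have hsm : s[c-1] < x := hlt (c-1) hm1 (by omega)
    have hmem : s[c-1] ∈ ks := (PySem.List.mem_sorted ks (fun k => k) false _).1 (List.getElem_mem hm1)
    have hfmem : s[c-1] ∈ ks.filter (fun k => decide (k < x)) := by
      rw [List.mem_filter]; exact ⟨hmem, by simpa using hsm⟩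
    obtain ⟨m, hmax⟩ : ∃ m, PySem.List.max? (ks.filter (fun k => decide (k < x))) (fun k => k) = some m := by
      cases hm : PySem.List.max? (ks.filter (fun k => decide (k < x))) (fun k => k) with
      | none => rw [PySem.List.max?_eq_none_iff] at hm; rw [hm] at hfmem; simp at hfmem
      | some m => exact ⟨m, rfl⟩
    have hmmem := PySem.List.max?_mem hmax
    rw [List.mem_filter] at hmmem
    have hmx : m < x := by simpa using hmmem.2
    have hms : m ∈ s := (PySem.List.mem_sorted ks (fun k => k) false m).2 hmmem.1
    obtain ⟨j, hj, hjm⟩ := List.mem_iff_getElem.1 hms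
    have hjc : j < c := by
      by_contra hcon
      have := hge j hj (by omega)
      omega
    have hm_le : m ≤ s[c-1] := by
      have := PySem.List.key_sorted_getElem_mono ks (fun k => k) (p := j) (q := c-1)
        (by omega) (by simpa [hs] using hm1)
      simpa [← hs, hjm] using this
    have hle_m : s[c-1] ≤ m := PySem.List.max?_isMax hmax _ hfmem
    have hmeq : s[c-1] = m := le_antisymm hle_m hm_le
    have hget : PySem.List.pyGetD s ((c : Int) - 1) 0 = s[c-1] := by
      rw [PySem.List.pyGetD_eq_getElem s 0 (by omega) (by omega)]
      congr 1
      omega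
    rw [if_neg (by omega), hget, hmeq]
    unfold pvShift
    rw [← hks, hmax]

theorem pv_eq (normalized_indices removal_map : List (Int × Int)) :
    convert_normalized_indices_to_unnormalized_indices normalized_indices removal_map
    = convert_normalized_indices_to_unnormalized_indices_alt normalized_indices removal_map := by
  unfold convert_normalized_indices_to_unnormalized_indices convert_normalized_indices_to_unnormalized_indices_alt
  rw [PySem.List.foldl_append_singleton_eq_map]
  rw [List.nil_append]
  apply List.map_congr_left
  intro p _
  rw [pvShift_eq (PySem.Dict.ofList removal_map) p.1 p.1,
      pvShift_eq (PySem.Dict.ofList removal_map) p.2 (p.2 - 1)]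

-- ===== VERDICT (by name: the statement is the Claim_ definition above) =====
theorem convert_normalized_indices_to_unnormalized_indices_spec : Claim_equal_convert_normalized_indices_to_unnormalized_indices := by
  intro ni rm _
  unfold Spec_convert_normalized_indices_to_unnormalized_indices
  exact pv_eq ni rm
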